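-- pv_equiv track=rewrite | github.com/Phoenix7290/TP-Python | tp3/ex12/main.py | extrair_codigos
-- ===== SOURCE A (Python) =====
-- def extrair_codigos(mensagem):
--     codigos = []
--     i = 0
--     while i < len(mensagem):
--         if mensagem[i] == "@":
--             j = i + 1
--             while j < len(mensagem) and mensagem[j] != "#":
--                 j += 1
--             if j < len(mensagem):
--                 trecho = mensagem[i+1:j]
--                 codigo_limpo = ""
--                 for char in trecho:
--                     if char.isalnum():
--                         codigo_limpo += char
--                 if codigo_limpo:
--                     codigos.append(codigo_limpo)
--                 i = j
--             else:
--                 break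
--         i += 1
--     return codigos
-- ===== SOURCE B (Python) =====
-- def extrair_codigos(mensagem):
--     codigos = []
--     for trecho in mensagem.split('#')[:-1]:
--         pos = trecho.find('@')
--         if pos != -1:
--             codigo = ''.join(c for c in trecho[pos+1:] if c.isalnum())
--             if codigo:
--                 codigos.append(codigo)
--     return codigos
-- ===== Notes on version B (the rewrite author's own statement) =====
-- stated objective: faster
-- what changed: Replaces the manual index-based two-pointer scan (outer while over the indices, inner while hunting the closing delimiter, per-character string concatenation) by an idiomatic decomposition: split the message on the closing delimiter, drop the unterminated last piece, and for each piece keep the alphanumeric characters after its first opening marker via find and a join of a comprehension.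
import Mathlib
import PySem

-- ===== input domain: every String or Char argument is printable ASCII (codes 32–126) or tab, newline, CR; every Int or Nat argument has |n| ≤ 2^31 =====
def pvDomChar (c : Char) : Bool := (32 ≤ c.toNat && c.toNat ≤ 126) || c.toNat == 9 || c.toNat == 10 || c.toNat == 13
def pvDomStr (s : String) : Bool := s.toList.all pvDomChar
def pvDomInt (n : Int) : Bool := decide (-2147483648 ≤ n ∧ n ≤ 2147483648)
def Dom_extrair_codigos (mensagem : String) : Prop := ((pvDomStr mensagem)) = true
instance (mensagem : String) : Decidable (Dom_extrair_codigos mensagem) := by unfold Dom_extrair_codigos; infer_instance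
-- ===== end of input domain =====

-- B replaces A's index-based two-pointer scan by split + find + a filtering join (same results; a timing run measured B faster).

-- ===== PORT A =====
-- inner while: advance j to the first '#' at or after j, or to len(mensagem)
def extrairJ (s : List Char) (j : Nat) : Nat :=
  if h : j < s.length then
    if s[j] ≠ '#' then extrairJ s (j + 1) else j
  else j
termination_by s.length - j

-- termination fact the outer loop cites: the inner scan never moves backwards
theorem extrairJ_ge (s : List Char) (j : Nat) : j ≤ extrairJ s j := by
  unfold extrairJ
  split
  · split
    · have := extrairJ_ge s (j + 1); omega
    · omega
  · omega
termination_by s.length - j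

-- outer while over index i, accumulating `codigos`
def extrairLoop (s : List Char) (i : Nat) (acc : List String) : List String :=
  if h : i < s.length then
    if s[i] = '@' then
      let j := extrairJ s (i + 1)
      if hj : j < s.length then
        let trecho := PySem.List.slice s (some ((i : Int) + 1)) (some (j : Int))
        let limpo := trecho.foldl (fun cl c => if PySem.Chars.isalnum c then cl ++ [c] else cl) []
        extrairLoop s (j + 1) (if limpo ≠ [] then acc ++ [String.ofList limpo] else acc)
      else acc
    else extrairLoop s (i + 1) acc
  else acc
termination_by s.length - i
decreasing_by
  · have := extrairJ_ge s (i + 1); omega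
  · omega

def extrair_codigos (mensagem : String) : List String :=
  extrairLoop mensagem.toList 0 []

-- ===== PORT B =====
def extrair_codigos_alt (mensagem : String) : List String :=
  (PySem.List.slice (PySem.Chars.splitOn mensagem.toList ['#']) none (some (-1))).foldl
    (fun codigos trecho =>
      let pos := PySem.Chars.find trecho ['@']
      if pos ≠ -1 then
        let codigo := (PySem.List.slice trecho (some (pos + 1)) none).filter PySem.Chars.isalnum
        if codigo ≠ [] then codigos ++ [String.ofList codigo] else codigos
      else codigos) []

-- ===== PRECONDITION & SPEC =====
def Spec_extrair_codigos (mensagem : String) (out : List String) : Prop := out = extrair_codigos_alt mensagem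
instance (mensagem : String) (out : List String) : Decidable (Spec_extrair_codigos mensagem out) := by unfold Spec_extrair_codigos; infer_instance

-- ===== CLAIM (what is proved, stated in full; the proofs are below) =====
def Claim_equal_extrair_codigos : Prop := ∀ (mensagem : String), Dom_extrair_codigos mensagem → Spec_extrair_codigos mensagem (extrair_codigos mensagem)

-- ===== LEMMAS AND PROOFS =====

-- what B does to one '#'-delimited chunk
def fstep (w : List Char) : List String :=
  let pos := PySem.Chars.find w ['@']
  if pos ≠ -1 then
    let codigo := (PySem.List.slice w (some (pos + 1)) none).filter PySem.Chars.isalnum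
    if codigo ≠ [] then [String.ofList codigo] else []
  else []

-- common reference: process the suffix chunk-by-chunk ('@' opens a code, the next '#' closes it)
def gRef : List Char → List String
  | [] => []
  | c :: rest =>
    if c = '@' then
      if rest.any (· = '#') then
        (let cl := (rest.takeWhile (· ≠ '#')).filter PySem.Chars.isalnum
         if cl ≠ [] then [String.ofList cl] else []) ++ gRef ((rest.dropWhile (· ≠ '#')).tail)
      else []
    else gRef rest
termination_by cs => cs.length
decreasing_by
  · have h1 := List.length_dropWhile_le (fun c => decide (c ≠ '#')) rest
    have h2 := @List.length_tail _ (rest.dropWhile (fun c => decide (c ≠ '#')))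
    simp at *; omega
  · simp

-- structural model of splitOn's fuelled accumulator loop
def splitAux : List Char → List Char → List (List Char)
  | [], cur => [cur.reverse]
  | c :: rest, cur => if c = '#' then cur.reverse :: splitAux rest [] else splitAux rest (c :: cur)

theorem splitOn_go_eq (fuel : Nat) (l cur : List Char) (acc : List (List Char))
    (h : l.length < fuel) :
    PySem.Chars.splitOn.go ['#'] fuel l cur acc = acc.reverse ++ splitAux l cur := by
  induction fuel generalizing l cur acc with
  | zero => omega
  | succ n ih =>
    cases l with
    | nil => simp [PySem.Chars.splitOn.go, splitAux]
    | cons c rest =>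
      rw [PySem.Chars.splitOn.go]
      by_cases hc : c = '#'
      · subst hc
        simp only [List.isPrefixOf, BEq.rfl, Bool.true_and, if_pos]
        rw [ih _ _ _ (by simp at h ⊢; omega)]
        simp [splitAux]
      · have hp : List.isPrefixOf ['#'] (c :: rest) = false := by
          simp [List.isPrefixOf]; exact fun h' => absurd h'.symm hc
        rw [hp]
        simp only [Bool.false_eq_true, if_neg, not_false_iff]
        rw [ih _ _ _ (by simp at h ⊢; omega)]
        simp [splitAux, hc]

theorem splitAux_ne_nil (cs cur : List Char) : splitAux cs cur ≠ [] := by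
  induction cs generalizing cur with
  | nil => simp [splitAux]
  | cons c rest ih => simp only [splitAux]; split <;> simp [ih]

theorem splitOn_hash (cs : List Char) :
    PySem.Chars.splitOn cs ['#'] = splitAux cs [] := by
  unfold PySem.Chars.splitOn
  rw [splitOn_go_eq cs.length.succ cs [] [] (by omega)]
  simp

theorem find_go_shift (w : List Char) (k : Nat) :
    PySem.Chars.find.go ['@'] w k =
      if PySem.Chars.find w ['@'] = -1 then -1 else PySem.Chars.find w ['@'] + k := by
  induction w generalizing k with
  | nil => simp [PySem.Chars.find, PySem.Chars.find.go]
  | cons c rest ih =>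
    rw [PySem.Chars.find.go]
    by_cases hc : c = '@'
    · subst hc
      have : PySem.Chars.find ('@' :: rest) ['@'] = 0 := by
        simp [PySem.Chars.find, PySem.Chars.find.go, List.isPrefixOf]
      simp [this, List.isPrefixOf]
    · have hp : List.isPrefixOf ['@'] (c :: rest) = false := by
        simp [List.isPrefixOf]; exact fun h' => absurd h'.symm hc
      have hf : PySem.Chars.find (c :: rest) ['@'] =
          if PySem.Chars.find rest ['@'] = -1 then -1 else PySem.Chars.find rest ['@'] + 1 := by
        rw [PySem.Chars.find, PySem.Chars.find.go, hp]
        simp only [Bool.false_eq_true, if_neg, not_false_iff]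
        exact ih 1
      rw [hp]
      simp only [Bool.false_eq_true, if_neg, not_false_iff]
      rw [ih (k+1), hf]
      have := PySem.Chars.neg_one_le_find rest ['@']
      split
      · simp_all
      · rename_i hne
        rw [if_neg (by omega)]
        push_cast; ring

theorem find_cons_ne (c : Char) (w : List Char) (hc : c ≠ '@') :
    PySem.Chars.find (c :: w) ['@'] =
      if PySem.Chars.find w ['@'] = -1 then -1 else PySem.Chars.find w ['@'] + 1 := by
  have hp : List.isPrefixOf ['@'] (c :: w) = false := by
    simp [List.isPrefixOf]; exact fun h' => absurd h'.symm hc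
  rw [PySem.Chars.find, PySem.Chars.find.go, hp]
  simp only [Bool.false_eq_true, if_neg, not_false_iff]
  rw [find_go_shift w 1]
  norm_num

theorem fstep_at (w : List Char) : fstep ('@' :: w) =
    (let cl := w.filter PySem.Chars.isalnum; if cl ≠ [] then [String.ofList cl] else []) := by
  have h0 : PySem.Chars.find ('@' :: w) ['@'] = 0 := by
    simp [PySem.Chars.find, PySem.Chars.find.go, List.isPrefixOf]
  simp only [fstep, h0]
  rw [show ((0:Int) + 1) = ((1:Nat):Int) by norm_num, PySem.List.slice_from_natCast]
  simp

theorem fstep_cons_ne (c : Char) (w : List Char) (hc : c ≠ '@') :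
    fstep (c :: w) = fstep w := by
  rw [fstep, fstep, find_cons_ne c w hc]
  by_cases h : PySem.Chars.find w ['@'] = -1
  · simp [h]
  · have hge : 0 ≤ PySem.Chars.find w ['@'] := by
      have := PySem.Chars.neg_one_le_find w ['@']; omega
    have hsl : PySem.List.slice (c :: w) (some (PySem.Chars.find w ['@'] + 1 + 1)) none
        = PySem.List.slice w (some (PySem.Chars.find w ['@'] + 1)) none := by
      rw [show PySem.Chars.find w ['@'] + 1 + 1 = (((PySem.Chars.find w ['@']).toNat + 2 : Nat) : Int) by omega,
          show PySem.Chars.find w ['@'] + 1 = (((PySem.Chars.find w ['@']).toNat + 1 : Nat) : Int) by omega,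
          PySem.List.slice_from_natCast, PySem.List.slice_from_natCast]
      simp [List.drop_succ_cons]
    simp only [if_neg h, hsl]
    simp only [ne_eq, ite_not]
    rw [if_neg (by omega : ¬ PySem.Chars.find w ['@'] + 1 = -1), if_neg h]

theorem fstep_nil : fstep [] = [] := by
  simp [fstep, PySem.Chars.find, PySem.Chars.find.go]

theorem gRef_no_hash (cs : List Char) (h : ¬ '#' ∈ cs) : gRef cs = [] := by
  induction cs with
  | nil => simp [gRef]
  | cons c rest ih =>
    rw [gRef]
    simp only [List.mem_cons, not_or] at h
    have hany : rest.any (· = '#') = false := by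
      simp only [List.any_eq_false]; intro x hx; simp; intro he; exact h.2 (he ▸ hx)
    split
    · simp [hany]
    · exact ih h.2

theorem gRef_hash (cs : List Char) (h : '#' ∈ cs) :
    gRef cs = fstep (cs.takeWhile (· ≠ '#')) ++ gRef ((cs.dropWhile (· ≠ '#')).tail) := by
  induction cs with
  | nil => simp at h
  | cons c rest ih =>
    by_cases hc : c = '#'
    · subst hc
      simp only [List.takeWhile_cons, List.dropWhile_cons]
      norm_num
      rw [gRef, fstep_nil]
      simp
    · have hrest : '#' ∈ rest := by
        rcases List.mem_cons.mp h with h1 | h1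
        · exact absurd h1.symm hc
        · exact h1
      simp only [List.takeWhile_cons, List.dropWhile_cons]
      rw [if_pos (by simp [hc]), if_pos (by simp [hc])]
      by_cases ha : c = '@'
      · subst ha
        rw [gRef, if_pos rfl, if_pos (by simp only [List.any_eq_true]; exact ⟨'#', hrest, by simp⟩), fstep_at]
      · rw [gRef, if_neg ha, fstep_cons_ne c _ ha, ih hrest]

theorem splitAux_no_hash (cs cur : List Char) (h : ¬ '#' ∈ cs) :
    splitAux cs cur = [cur.reverse ++ cs] := by
  induction cs generalizing cur with
  | nil => simp [splitAux]
  | cons c rest ih =>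
    simp only [List.mem_cons, not_or] at h
    rw [splitAux, if_neg (fun he => h.1 he.symm), ih _ h.2]
    simp

theorem splitAux_hash (cs cur : List Char) (h : '#' ∈ cs) :
    splitAux cs cur = (cur.reverse ++ cs.takeWhile (· ≠ '#')) :: splitAux ((cs.dropWhile (· ≠ '#')).tail) [] := by
  induction cs generalizing cur with
  | nil => simp at h
  | cons c rest ih =>
    by_cases hc : c = '#'
    · subst hc
      rw [splitAux, if_pos rfl]
      simp
    · have hrest : '#' ∈ rest := by
        rcases List.mem_cons.mp h with h1 | h1
        · exact absurd h1.symm hc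
        · exact h1
      rw [splitAux, if_neg hc, ih _ hrest]
      simp [hc]

theorem slice_neg_one_dropLast {α : Type} (l : List α) :
    PySem.List.slice l none (some (-1)) = l.dropLast := by
  rw [PySem.List.slice, PySem.List.clampIdx, List.dropLast_eq_take]
  cases l with
  | nil => simp
  | cons a t =>
    have h1 : ¬ ((a :: t).length : Int) + (-1) < 0 := by simp
    rw [if_pos (by norm_num), if_neg h1]
    simp only [List.drop_zero]
    congr 1
    omega

theorem foldB_eq_gRef (cs : List Char) (acc : List String) :
    (splitAux cs []).dropLast.foldl
      (fun codigos trecho =>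
        let pos := PySem.Chars.find trecho ['@']
        if pos ≠ -1 then
          let codigo := (PySem.List.slice trecho (some (pos + 1)) none).filter PySem.Chars.isalnum
          if codigo ≠ [] then codigos ++ [String.ofList codigo] else codigos
        else codigos) acc = acc ++ gRef cs := by
  by_cases h : '#' ∈ cs
  · rw [splitAux_hash cs [] h, gRef_hash cs h]
    rw [List.dropLast_cons_of_ne_nil (splitAux_ne_nil _ _)]
    rw [List.foldl_cons]
    have hlen : ((cs.dropWhile (· ≠ '#')).tail).length < cs.length := by
      have h1 := List.length_dropWhile_le (fun c => decide (c ≠ '#')) cs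
      have h2 := @List.length_tail _ (cs.dropWhile (fun c => decide (c ≠ '#')))
      have h3 : cs ≠ [] := by rintro rfl; simp at h
      have h4 : (cs.dropWhile (fun c => decide (c ≠ '#'))) ≠ [] := by
        simp only [ne_eq, List.dropWhile_eq_nil_iff, not_forall]
        exact ⟨'#', h, by simp⟩
      have h5 : 0 < (cs.dropWhile (fun c => decide (c ≠ '#'))).length := List.length_pos_iff.mpr h4
      have h6 : 0 < cs.length := List.length_pos_iff.mpr h3
      omega
    rw [foldB_eq_gRef ((cs.dropWhile (· ≠ '#')).tail)]
    have hf : ∀ (a : List String) w, (let pos := PySem.Chars.find w ['@'];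
        if pos ≠ -1 then
          let codigo := (PySem.List.slice w (some (pos + 1)) none).filter PySem.Chars.isalnum
          if codigo ≠ [] then a ++ [String.ofList codigo] else a
        else a) = a ++ fstep w := by
      intro a w
      simp only [fstep]
      split
      · split <;> simp
      · simp
    simp only [List.reverse_nil, List.nil_append]
    rw [hf, List.append_assoc]
  · rw [splitAux_no_hash cs [] h, gRef_no_hash cs h]
    simp
termination_by cs.length
decreasing_by exact hlen

theorem dropWhile_eq_drop_len (l : List Char) (p : Char → Bool) :
    l.dropWhile p = l.drop (l.takeWhile p).length := by
  induction l with
  | nil => simp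
  | cons c t ih => by_cases hp : p c <;> simp [hp, ih]

theorem extrairJ_eq (s : List Char) (j : Nat) :
    extrairJ s j = j + ((s.drop j).takeWhile (· ≠ '#')).length := by
  unfold extrairJ
  split
  · rename_i h
    rw [List.drop_eq_getElem_cons h]
    split
    · rename_i hne
      rw [extrairJ_eq s (j + 1)]
      rw [List.takeWhile_cons, if_pos (by simpa using hne)]
      simp only [List.length_cons]
      omega
    · rename_i hne
      simp only [ne_eq, not_not] at hne
      rw [List.takeWhile_cons, if_neg (by simp [hne])]
      simp
  · rename_i h
    rw [List.drop_eq_nil_iff.mpr (by omega)]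
    simp
termination_by s.length - j

theorem hash_mem_iff (l : List Char) :
    '#' ∈ l ↔ (l.takeWhile (· ≠ '#')).length < l.length := by
  constructor
  · intro h
    rcases Nat.lt_or_ge (l.takeWhile (· ≠ '#')).length l.length with h1 | h1
    · exact h1
    · exfalso
      have hle := (List.takeWhile_prefix (p := fun c => decide (c ≠ '#')) (l := l)).length_le
      have heq : l.takeWhile (· ≠ '#') = l :=
        List.IsPrefix.eq_of_length (List.takeWhile_prefix _) (by omega)
      have := (List.takeWhile_eq_self_iff (p := fun c => decide (c ≠ '#')) (l := l)).mp heq '#' h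
      simp at this
  · intro h
    by_contra hnot
    have heq : l.takeWhile (· ≠ '#') = l :=
      List.takeWhile_eq_self_iff.mpr (fun x hx => by
        simp only [decide_eq_true_eq, ne_eq]
        exact fun he => hnot (he ▸ hx))
    rw [heq] at h
    omega

theorem extrairLoop_eq_gRef (s : List Char) (i : Nat) (acc : List String) :
    extrairLoop s i acc = acc ++ gRef (s.drop i) := by
  by_cases h : i < s.length
  · by_cases ha : s[i] = '@'
    · have hJ := extrairJ_eq s (i + 1)
      set t := ((s.drop (i + 1)).takeWhile (· ≠ '#')).length with ht
      have htle : t ≤ (s.drop (i + 1)).length := (List.takeWhile_prefix _).length_le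
      have hdl : (s.drop (i + 1)).length = s.length - (i + 1) := by simp
      by_cases hj : extrairJ s (i + 1) < s.length
      · -- a '#' closes the chunk
        have hmem : '#' ∈ s.drop (i + 1) := (hash_mem_iff _).mpr (by omega)
        have htr : PySem.List.slice s (some ((i : Int) + 1)) (some ((extrairJ s (i + 1) : Nat) : Int))
            = (s.drop (i + 1)).takeWhile (· ≠ '#') := by
          rw [show ((i : Int) + 1) = (((i + 1 : Nat)) : Int) by push_cast; ring, PySem.List.slice_natCast]
          rw [hJ]
          have h2 : i + 1 + t - (i + 1) = t := by omega
          rw [h2]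
          exact ((List.prefix_iff_eq_take.mp (List.takeWhile_prefix _)).symm)
        have hfold : ∀ w : List Char, w.foldl (fun cl c => if PySem.Chars.isalnum c then cl ++ [c] else cl) []
            = w.filter PySem.Chars.isalnum := by
          intro w
          have h3 := PySem.List.foldl_append_if PySem.Chars.isalnum (fun c => c) w []
          simpa using h3
        have hrest : s.drop (extrairJ s (i + 1) + 1) = ((s.drop (i + 1)).dropWhile (· ≠ '#')).tail := by
          rw [dropWhile_eq_drop_len, List.tail_drop, List.drop_drop, hJ]
          congr 1
        rw [extrairLoop]
        simp only [dif_pos h, if_pos ha, dif_pos hj, htr, hfold]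
        rw [extrairLoop_eq_gRef s (extrairJ s (i + 1) + 1), hrest]
        rw [List.drop_eq_getElem_cons h, gRef, if_pos ha,
            if_pos (List.any_eq_true.mpr ⟨'#', hmem, by simp⟩)]
        by_cases hcl : List.filter PySem.Chars.isalnum (List.takeWhile (fun x => !decide (x = '#')) (List.drop (i + 1) s)) = []
        · simp [hcl]
        · simp [hcl]
      · -- no closing '#': A breaks, gRef yields []
        have hnomem : ¬ '#' ∈ s.drop (i + 1) := by
          rw [hash_mem_iff]
          omega
        rw [extrairLoop]
        simp only [dif_pos h, if_pos ha, dif_neg hj]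
        rw [List.drop_eq_getElem_cons h, gRef, if_pos ha,
            if_neg (by simp only [List.any_eq_true]; rintro ⟨x, hx, hx2⟩; simp at hx2; exact hnomem (hx2 ▸ hx))]
        simp
    · rw [extrairLoop]
      simp only [dif_pos h, if_neg ha]
      rw [extrairLoop_eq_gRef s (i + 1)]
      rw [List.drop_eq_getElem_cons h, gRef, if_neg ha]
  · rw [extrairLoop, dif_neg h, List.drop_eq_nil_iff.mpr (by omega)]
    simp [gRef]
termination_by s.length - i
decreasing_by
  · have := extrairJ_ge s (i + 1); omega
  · omega

-- ===== VERDICT (by name: the statement is the Claim_ definition above) =====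
theorem extrair_codigos_spec : Claim_equal_extrair_codigos := by
  intro m _
  unfold Spec_extrair_codigos extrair_codigos extrair_codigos_alt
  rw [extrairLoop_eq_gRef, splitOn_hash, slice_neg_one_dropLast, foldB_eq_gRef]
  simp
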